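-- pv_equiv track=rewrite | github.com/bbalouki/bbstrader | bbstrader/tseries.py | execute_trading_strategy
-- ===== SOURCE A (Python) =====
-- def execute_trading_strategy(predictions):
--     """
--     Executes the trading strategy based on a list
--     of predictions, determining positions to take.
--
--     Args:
--         predictions (list): A list of predicted returns.
--
--     Returns:
--         list: A list of positions (1 for 'LONG', -1 for 'SHORT', 0 for 'HOLD').
--     """
--     positions = []  # Long if 1, Short if -1
--     previous_position = 0  # Initial position
--     for prediction in predictions:
--         if prediction > 0:
--             current_position = 1  # Long
--         elif prediction < 0:
--             current_position = -1  # Short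
--         else:
--             current_position = previous_position  # Hold previous position
--         positions.append(current_position)
--         previous_position = current_position
--
--     return positions
-- ===== SOURCE B (Python) =====
-- def execute_trading_strategy(predictions):
--     # Run-length block fill: find each maximal run of equal-sign predictions
--     # with a second pointer and extend the output by a constant block; a run of
--     # zeros copies the output's last element (the position carried forward).
--     n = len(predictions)
--     out = []
--     i = 0
--     while i < n:
--         s = (predictions[i] > 0) - (predictions[i] < 0)
--         j = i
--         while j < n and ((predictions[j] > 0) - (predictions[j] < 0)) == s:
--             j += 1
--         fill = s if s != 0 else (out[-1] if out else 0)
--         out += [fill] * (j - i)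
--         i = j
--     return out
-- ===== Notes on version B (the rewrite author's own statement) =====
-- stated objective: alternative
-- what changed: B is a two-pointer run-length block fill: it finds each maximal run of equal-sign predictions with an inner scan and extends the output by a constant block, reading the carried position from the output's last element, instead of A's element-by-element loop with a scalar previous_position state.
import Mathlib
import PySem

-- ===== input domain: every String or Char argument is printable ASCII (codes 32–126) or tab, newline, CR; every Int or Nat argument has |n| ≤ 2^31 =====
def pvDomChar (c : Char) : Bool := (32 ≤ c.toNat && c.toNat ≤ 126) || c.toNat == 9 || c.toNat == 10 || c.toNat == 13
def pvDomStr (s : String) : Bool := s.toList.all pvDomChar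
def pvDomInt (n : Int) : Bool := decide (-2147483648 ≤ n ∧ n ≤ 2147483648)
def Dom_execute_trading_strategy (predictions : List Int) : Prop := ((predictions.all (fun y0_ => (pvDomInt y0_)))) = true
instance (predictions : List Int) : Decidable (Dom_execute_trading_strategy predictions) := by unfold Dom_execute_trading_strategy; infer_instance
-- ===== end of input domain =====

-- B replaces A's element-wise stateful loop by a two-pointer run-length block fill
-- (same return value on all inputs; alternative decomposition, no speed claim).

-- ===== PORT A =====
def execute_trading_strategy (predictions : List Int) : List Int :=
  -- positions = []; previous_position = 0; for prediction in predictions: ...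
  (predictions.foldl
    (fun st prediction =>
      let current_position : Int :=
        if prediction > 0 then 1
        else if prediction < 0 then -1
        else st.2
      (st.1 ++ [current_position], current_position))
    (([] : List Int), (0 : Int))).1

-- ===== PORT B =====
-- (p > 0) - (p < 0)
def pvSgn (p : Int) : Int :=
  (if p > 0 then (1 : Int) else 0) - (if p < 0 then (1 : Int) else 0)

-- inner while of Source B: j advances while j < n and sign(predictions[j]) == s.
-- 'fuel' only bounds the iteration count so the recursion is structural; with
-- fuel ≥ n - j it never runs out (the loop body always increases j).
def pvRunEnd (preds : List Int) (s : Int) : Nat → Nat → Nat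
  | 0, j => j
  | fuel + 1, j =>
    if h : j < preds.length then
      if pvSgn preds[j] = s then pvRunEnd preds s fuel (j + 1) else j
    else j

-- outer while loop of Source B, same fuel convention (i strictly increases each pass)
def pvBLoop (preds : List Int) : Nat → List Int → Nat → List Int
  | 0, out, _ => out
  | fuel + 1, out, i =>
    if h : i < preds.length then
      let s := pvSgn preds[i]
      let j := pvRunEnd preds s preds.length (i + 1)
      -- fill = s if s != 0 else (out[-1] if out else 0)
      let fill : Int := if s ≠ 0 then s else (out.getLast?.getD 0)
      pvBLoop preds fuel (out ++ List.replicate (j - i) fill) j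
    else out

def execute_trading_strategy_alt (predictions : List Int) : List Int :=
  pvBLoop predictions predictions.length [] 0

-- ===== PRECONDITION & SPEC =====
def Spec_execute_trading_strategy (predictions : List Int) (out : List Int) : Prop := out = execute_trading_strategy_alt predictions
instance (predictions : List Int) (out : List Int) : Decidable (Spec_execute_trading_strategy predictions out) := by unfold Spec_execute_trading_strategy; infer_instance

-- ===== CLAIM (what is proved, stated in full; the proofs are below) =====
def Claim_equal_execute_trading_strategy : Prop := ∀ (predictions : List Int), Dom_execute_trading_strategy predictions → Spec_execute_trading_strategy predictions (execute_trading_strategy predictions)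

-- ===== LEMMAS AND PROOFS =====

-- reference: fill-forward over the list of signs
def pvFF (prev : Int) : List Int → List Int
  | [] => []
  | s :: t => (if s ≠ 0 then s else prev) :: pvFF (if s ≠ 0 then s else prev) t

theorem pvA_eq_ff (preds : List Int) (acc : List Int) (prev : Int) :
    (preds.foldl
      (fun st prediction =>
        let current_position : Int :=
          if prediction > 0 then 1
          else if prediction < 0 then -1
          else st.2
        (st.1 ++ [current_position], current_position))
      (acc, prev)).1 = acc ++ pvFF prev (preds.map pvSgn) := by
  induction preds generalizing acc prev with
  | nil => simp [pvFF]
  | cons p t ih =>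
    simp only [List.foldl, List.map, pvFF]
    rw [ih]
    have hs : (if p > 0 then (1:Int) else if p < 0 then -1 else prev)
        = (if pvSgn p ≠ 0 then pvSgn p else prev) := by
      unfold pvSgn; split_ifs <;> omega
    rw [hs]
    simp

-- ff on a constant run whose step is a fixed point
theorem pvFF_replicate (k : Nat) (s c : Int) (rest : List Int)
    (hc : (if s ≠ 0 then s else c) = c) :
    pvFF c (List.replicate k s ++ rest) = List.replicate k c ++ pvFF c rest := by
  induction k with
  | zero => simp
  | succ k ih => simp [List.replicate_succ, pvFF, hc, ih]

theorem pvRunEnd_char (preds : List Int) (s : Int) (fuel j : Nat)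
    (hfuel : preds.length ≤ fuel + j) :
    pvRunEnd preds s fuel j = j + ((preds.drop j).takeWhile (fun p => pvSgn p = s)).length := by
  induction fuel generalizing j with
  | zero =>
    rw [pvRunEnd, List.drop_eq_nil_of_le (by omega)]
    simp
  | succ fuel ih =>
    rw [pvRunEnd]
    split
    · rename_i h
      have hcons : preds.drop j = preds[j] :: preds.drop (j + 1) := List.drop_eq_getElem_cons h
      split
      · rename_i hs
        rw [ih (j + 1) (by omega), hcons,
          List.takeWhile_cons_of_pos (by simpa using hs), List.length_cons]
        omega
      · rename_i hs
        rw [hcons, List.takeWhile_cons_of_neg (by simpa using hs)]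
        simp
    · rename_i h
      rw [List.drop_eq_nil_of_le (by omega)]
      simp

theorem pvBLoop_eq (preds : List Int) (fuel i : Nat) (out : List Int)
    (hfuel : preds.length ≤ fuel + i) :
    pvBLoop preds fuel out i = out ++ pvFF (out.getLast?.getD 0) ((preds.drop i).map pvSgn) := by
  induction fuel generalizing i out with
  | zero =>
    rw [pvBLoop, List.drop_eq_nil_of_le (by omega)]
    simp [pvFF]
  | succ fuel ih =>
    rw [pvBLoop]
    split
    · rename_i h
      set s := pvSgn preds[i] with hsdef
      set j := pvRunEnd preds s preds.length (i + 1) with hjdef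
      set fill : Int := if s ≠ 0 then s else (out.getLast?.getD 0) with hfdef
      set r := (preds.drop (i+1)).takeWhile (fun p => pvSgn p = s) with hrdef
      have hj : j = (i + 1) + r.length :=
        pvRunEnd_char preds s preds.length (i + 1) (by omega)
      have hji : i < j := by omega
      rw [ih j _ (by omega)]
      -- last element of the new out is fill
      have hlast : ((out ++ List.replicate (j - i) fill).getLast?.getD 0) = fill := by
        rw [List.getLast?_append_of_ne_nil]
        · rw [List.getLast?_replicate]
          simp [Nat.sub_ne_zero_of_lt hji]
        · simp [Nat.sub_ne_zero_of_lt hji]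
      rw [hlast]
      -- decompose the suffix at the run boundary
      have hdropj : preds.drop j = (preds.drop (i+1)).drop r.length := by
        rw [hj]; exact List.drop_drop.symm
      have hdrop1 : preds.drop (i+1) = r ++ (preds.drop (i+1)).dropWhile (fun p => pvSgn p = s) := by
        rw [hrdef, List.takeWhile_append_dropWhile]
      have hdropj' : preds.drop j = (preds.drop (i+1)).dropWhile (fun p => pvSgn p = s) := by
        rw [hdropj]
        conv_lhs => rw [hdrop1]
        simp
      have hdropi : preds.drop i = preds[i] :: preds.drop (i+1) := List.drop_eq_getElem_cons h
      -- signs along r are all s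
      have hr_map : r.map pvSgn = List.replicate r.length s := by
        rw [show r.length = (r.map pvSgn).length from (List.length_map ..).symm]
        apply List.eq_replicate_of_mem
        intro b hb
        rcases List.mem_map.mp hb with ⟨p, hp, rfl⟩
        have := List.mem_takeWhile_imp (hrdef ▸ hp)
        simpa using this
      have hfill_fix : (if s ≠ 0 then s else fill) = fill := by
        by_cases hs : s = 0 <;> simp [hfdef, hs]
      rw [hdropi]
      conv_rhs => rw [hdrop1]
      simp only [List.map_cons, List.map_append, pvFF, hr_map, ← hsdef]
      rw [← hfdef, pvFF_replicate r.length s fill _ hfill_fix]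
      rw [hdropj']
      have hrep : fill :: List.replicate r.length fill = List.replicate (j - i) fill := by
        have : j - i = r.length + 1 := by omega
        rw [this, List.replicate_succ]
      rw [← List.cons_append, hrep, List.append_assoc]
    · rename_i h
      rw [List.drop_eq_nil_of_le (by omega)]
      simp [pvFF]

-- ===== VERDICT (by name: the statement is the Claim_ definition above) =====
theorem execute_trading_strategy_spec : Claim_equal_execute_trading_strategy := by
  intro predictions _
  unfold Spec_execute_trading_strategy execute_trading_strategy execute_trading_strategy_alt
  rw [pvBLoop_eq predictions predictions.length 0 [] (by omega), pvA_eq_ff]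
  simp
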